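-- pv_equiv track=rewrite | github.com/Roktar/codewars | catandmouse.py | cat_mouse
-- ===== SOURCE A (Python) =====
-- def cat_mouse(map_, moves):
--     map = toArray(map_ + " ")
--
--     cStart, cEnd = getIndex(map, 'C')
--     mStart, mEnd = getIndex(map, 'm')
--
--     if cStart == -1 or mStart == -1 :
--         return "boring without two animals"
--
--     while moves > -1 :
--         if cStart == mStart and cEnd == mEnd :
--             return "Caught!"
--
--         if cStart != mStart :
--             cStart += 1 if cStart < mStart else -1
--             moves -= 1
--         if cEnd != mEnd :
--             cEnd += 1 if cEnd < mEnd else -1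
--             moves -= 1
--
--     return "Escaped!"
--
-- def toArray(data) :
--     map = list()
--     sub = list()
--
--     for i in range(len(data)) :
--         if data[i] == '.' or data[i] == 'C' or data[i] == 'm' :
--             sub.append(data[i])
--         else :
--             map.append(sub)
--             sub = list()
--     return map
--
-- def getIndex(data, ch) :
--     for i in range(len(data)) :
--         for j in range(len(data[i])) :
--             if data[i][j] == ch :
--                 return i, j
--     return -1, -1
-- ===== SOURCE B (Python) =====
-- def cat_mouse(map_, moves):
--     cat = mouse = None
--     row = col = 0
--     for ch in map_ + " ":
--         if ch == '.' or ch == 'C' or ch == 'm':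
--             if ch == 'C' and cat is None:
--                 cat = (row, col)
--             elif ch == 'm' and mouse is None:
--                 mouse = (row, col)
--             col += 1
--         else:
--             row += 1
--             col = 0
--     if cat is None or mouse is None:
--         return "boring without two animals"
--     d = abs(cat[0] - mouse[0]) + abs(cat[1] - mouse[1])
--     return "Caught!" if d <= moves else "Escaped!"
-- ===== Notes on version B (the rewrite author's own statement) =====
-- stated objective: simpler
-- what changed: Replaces A's build-row-array + two full nested searches + step-by-step chase loop (decrementing moves) with a single pass over the characters that records the first (row,col) of 'C' and 'm', followed by a closed-form Manhattan-distance comparison d <= moves.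
import Mathlib
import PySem

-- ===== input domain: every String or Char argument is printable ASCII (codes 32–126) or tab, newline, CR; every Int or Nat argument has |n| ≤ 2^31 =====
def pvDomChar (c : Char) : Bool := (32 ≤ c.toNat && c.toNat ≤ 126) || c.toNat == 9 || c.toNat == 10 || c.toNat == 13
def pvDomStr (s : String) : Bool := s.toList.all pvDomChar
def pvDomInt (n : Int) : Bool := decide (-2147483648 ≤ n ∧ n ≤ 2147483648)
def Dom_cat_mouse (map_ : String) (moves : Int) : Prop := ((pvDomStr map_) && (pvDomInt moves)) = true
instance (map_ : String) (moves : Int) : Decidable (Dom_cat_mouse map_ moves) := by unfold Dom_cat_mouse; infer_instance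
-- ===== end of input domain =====

-- B replaces A's build-row-array + double search + step-by-step chase loop with a single
-- character pass locating both animals and a closed-form Manhattan-distance test (objective: simpler).

-- ===== PORT A =====
-- helper of A: toArray's loop, carried state (map, sub) as (acc, sub)
def pvToArrayAux : List Char → List Char → List (List Char) → List (List Char)
  | [], _, acc => acc
  | c :: rest, sub, acc =>
    if c = '.' ∨ c = 'C' ∨ c = 'm' then pvToArrayAux rest (sub ++ [c]) acc
    else pvToArrayAux rest [] (acc ++ [sub])

def pvToArray (data : List Char) : List (List Char) := pvToArrayAux data [] []

-- helper of A: getIndex's inner loop over one row (early return as Option)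
def pvGetIndexRow : List Char → Char → Int → Option Int
  | [], _, _ => none
  | c :: rest, ch, j => if c = ch then some j else pvGetIndexRow rest ch (j + 1)

-- helper of A: getIndex's outer loop over rows
def pvGetIndexAux : List (List Char) → Char → Int → Int × Int
  | [], _, _ => (-1, -1)
  | r :: rest, ch, i =>
    match pvGetIndexRow r ch 0 with
    | some j => (i, j)
    | none => pvGetIndexAux rest ch (i + 1)

def pvGetIndex (data : List (List Char)) (ch : Char) : Int × Int := pvGetIndexAux data ch 0

-- A's while loop: chase step by step, decrementing moves
def pvCatLoop (cStart cEnd mStart mEnd moves : Int) : String :=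
  if moves > -1 then
    if cStart = mStart ∧ cEnd = mEnd then "Caught!"
    else
      pvCatLoop
        (if cStart ≠ mStart then cStart + (if cStart < mStart then 1 else -1) else cStart)
        (if cEnd ≠ mEnd then cEnd + (if cEnd < mEnd then 1 else -1) else cEnd)
        mStart mEnd
        (if cEnd ≠ mEnd then (if cStart ≠ mStart then moves - 1 else moves) - 1
         else (if cStart ≠ mStart then moves - 1 else moves))
  else "Escaped!"
termination_by (moves + 1).toNat
decreasing_by split_ifs <;> omega

def cat_mouse (map_ : String) (moves : Int) : String :=
  let map := pvToArray (map_.toList ++ [' '])   -- map_ + " "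
  let c := pvGetIndex map 'C'
  let m := pvGetIndex map 'm'
  if c.1 = -1 ∨ m.1 = -1 then "boring without two animals"
  else pvCatLoop c.1 c.2 m.1 m.2 moves

-- ===== PORT B =====
-- B's single pass: state (cat, mouse, row, col)
def pvScanB : List Char → Option (Int × Int) → Option (Int × Int) → Int → Int →
    Option (Int × Int) × Option (Int × Int)
  | [], cat, mouse, _, _ => (cat, mouse)
  | c :: rest, cat, mouse, row, col =>
    if c = '.' ∨ c = 'C' ∨ c = 'm' then
      let p : Option (Int × Int) × Option (Int × Int) :=
        if c = 'C' ∧ cat = none then (some (row, col), mouse)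
        else if c = 'm' ∧ mouse = none then (cat, some (row, col))
        else (cat, mouse)
      pvScanB rest p.1 p.2 row (col + 1)
    else pvScanB rest cat mouse (row + 1) 0

def cat_mouse_alt (map_ : String) (moves : Int) : String :=
  match pvScanB (map_.toList ++ [' ']) none none 0 0 with
  | (some cat, some mouse) =>
    if (((cat.1 - mouse.1).natAbs : Int) + ((cat.2 - mouse.2).natAbs : Int)) ≤ moves
    then "Caught!" else "Escaped!"
  | _ => "boring without two animals"

-- ===== PRECONDITION & SPEC =====
def Spec_cat_mouse (map_ : String) (moves : Int) (out : String) : Prop := out = cat_mouse_alt map_ moves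
instance (map_ : String) (moves : Int) (out : String) : Decidable (Spec_cat_mouse map_ moves out) := by unfold Spec_cat_mouse; infer_instance

-- ===== CLAIM (what is proved, stated in full; the proofs are below) =====
def Claim_equal_cat_mouse : Prop := ∀ (map_ : String) (moves : Int), Dom_cat_mouse map_ moves → Spec_cat_mouse map_ moves (cat_mouse map_ moves)

-- ===== LEMMAS AND PROOFS =====
def pvRowsFrom : List Char → List Char → List (List Char)
  | [], _ => []
  | c :: rest, sub =>
    if c = '.' ∨ c = 'C' ∨ c = 'm' then pvRowsFrom rest (sub ++ [c])
    else sub :: pvRowsFrom rest []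
def pvIsCell (c : Char) : Bool := c = '.' || c = 'C' || c = 'm'
def pvCombine (o : Option (Int × Int)) (p : Int × Int) : Option (Int × Int) :=
  match o with
  | some q => some q
  | none => if p.1 = -1 then none else some p

theorem pvToArrayAux_eq (data : List Char) : ∀ sub acc,
    pvToArrayAux data sub acc = acc ++ pvRowsFrom data sub := by
  induction data with
  | nil => intro sub acc; simp [pvToArrayAux, pvRowsFrom]
  | cons c rest ih =>
    intro sub acc
    by_cases h : c = '.' ∨ c = 'C' ∨ c = 'm' <;>
      simp [pvToArrayAux, pvRowsFrom, h, ih]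

theorem pvGetIndexRow_none (ch : Char) (s : List Char) (hs : ch ∉ s) (j : Int) :
    pvGetIndexRow s ch j = none := by
  induction s generalizing j with
  | nil => rfl
  | cons c rest ih =>
    simp only [List.mem_cons, not_or] at hs
    simp [pvGetIndexRow, ih hs.2, Ne.symm hs.1]

theorem pvGetIndexRow_found (ch : Char) (s t : List Char) (hs : ch ∉ s) : ∀ j,
    pvGetIndexRow (s ++ ch :: t) ch j = some (j + s.length) := by
  induction s with
  | nil => intro j; simp [pvGetIndexRow]
  | cons c rest ih =>
    intro j
    simp only [List.mem_cons, not_or] at hs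
    simp only [List.cons_append, pvGetIndexRow, if_neg (fun h : c = ch => hs.1 h.symm), ih hs.2]
    congr 1
    simp only [List.length_cons]
    push_cast
    omega

theorem pvRowsFrom_struct (data : List Char) : ∀ sub, (∃ x ∈ data, pvIsCell x = false) →
    ∃ rows', pvRowsFrom data sub = (sub ++ data.takeWhile pvIsCell) :: rows' := by
  induction data with
  | nil => intro sub h; simp at h
  | cons c rest ih =>
    intro sub h
    by_cases hc : c = '.' ∨ c = 'C' ∨ c = 'm'
    · have hcell : pvIsCell c = true := by
        rcases hc with h | h | h <;> simp [pvIsCell, h]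
      have hrest : ∃ x ∈ rest, pvIsCell x = false := by
        rcases h with ⟨x, hx, hxf⟩
        rcases List.mem_cons.mp hx with rfl | hx'
        · rw [hcell] at hxf; cases hxf
        · exact ⟨x, hx', hxf⟩
      obtain ⟨rows', hr⟩ := ih (sub ++ [c]) hrest
      exact ⟨rows', by simp [pvRowsFrom, hc, hr, hcell]⟩
    · have hcell : pvIsCell c = false := by
        simp only [pvIsCell]
        simp only [not_or] at hc
        simp [hc.1, hc.2.1, hc.2.2]
      exact ⟨pvRowsFrom rest [], by simp [pvRowsFrom, hc, hcell]⟩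

-- the found-position computation, shared by the C and m cases
theorem pvFound (rest sub : List Char) (ch : Char) (row : Int)
    (hsep : ∃ x ∈ rest, pvIsCell x = false) (hsub : ch ∉ sub) :
    pvGetIndexAux (pvRowsFrom rest (sub ++ [ch])) ch row = (row, (sub.length : Int)) := by
  obtain ⟨rows', hr⟩ := pvRowsFrom_struct rest (sub ++ [ch]) hsep
  rw [hr]
  have : (sub ++ [ch]) ++ rest.takeWhile pvIsCell = sub ++ ch :: rest.takeWhile pvIsCell := by
    simp
  rw [pvGetIndexAux, this, pvGetIndexRow_found ch sub _ hsub 0]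
  simp

theorem pvScanB_eq (data : List Char) : ∀ (sub : List Char) (cat mouse : Option (Int × Int)) (row : Int),
    (∀ x, data.getLast? = some x → pvIsCell x = false) →
    0 ≤ row →
    (cat = none → 'C' ∉ sub) → (mouse = none → 'm' ∉ sub) →
    pvScanB data cat mouse row (sub.length : Int)
      = (pvCombine cat (pvGetIndexAux (pvRowsFrom data sub) 'C' row),
         pvCombine mouse (pvGetIndexAux (pvRowsFrom data sub) 'm' row)) := by
  induction data with
  | nil =>
    intro sub cat mouse row _ _ _ _
    cases cat <;> cases mouse <;> simp [pvScanB, pvRowsFrom, pvGetIndexAux, pvCombine]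
  | cons c rest ih =>
    intro sub cat mouse row hlast hrow hcat hmouse
    have hlast' : ∀ x, rest.getLast? = some x → pvIsCell x = false := by
      intro x hx
      apply hlast
      cases rest with
      | nil => simp at hx
      | cons b l => rw [List.getLast?_cons_cons]; exact hx
    by_cases hc : c = '.' ∨ c = 'C' ∨ c = 'm'
    · -- cell character
      have hcell : pvIsCell c = true := by
        rcases hc with h | h | h <;> simp [pvIsCell, h]
      have hne : rest ≠ [] := by
        intro h
        subst h
        have := hlast c (by simp)
        rw [hcell] at this; cases this
      have hsep : ∃ x ∈ rest, pvIsCell x = false := by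
        cases h : rest.getLast? with
        | none => exact absurd (List.getLast?_eq_none_iff.mp h) hne
        | some y => exact ⟨y, List.mem_of_getLast? h, hlast' y h⟩
      have hlen : ((sub ++ [c]).length : Int) = (sub.length : Int) + 1 := by simp
      rw [pvRowsFrom, if_pos hc, pvScanB, if_pos hc]
      have hlen' : (sub.length : Int) + 1 = (((sub ++ [c]).length : Nat) : Int) := by simp
      by_cases h1 : c = 'C' ∧ cat = none
      · obtain ⟨rfl, rfl⟩ := h1
        have hp : (if 'C' = 'C' ∧ (none : Option (Int × Int)) = none
              then (some (row, (sub.length : Int)), mouse)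
              else if 'C' = 'm' ∧ mouse = none then (none, some (row, (sub.length : Int)))
              else (none, mouse)) = (some (row, (sub.length : Int)), mouse) := by simp
        rw [hp]
        dsimp only
        rw [hlen', ih (sub ++ ['C']) (some (row, (sub.length : Int))) mouse row hlast' hrow
              (by intro h; cases h) (by intro h; simpa using hmouse h)]
        rw [pvFound rest sub 'C' row hsep (hcat rfl)]
        simp [pvCombine]
        omega
      · by_cases h2 : c = 'm' ∧ mouse = none
        · obtain ⟨rfl, rfl⟩ := h2
          have hp : (if 'm' = 'C' ∧ cat = none
                then (some (row, (sub.length : Int)), (none : Option (Int × Int)))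
                else if 'm' = 'm' ∧ (none : Option (Int × Int)) = none
                then (cat, some (row, (sub.length : Int)))
                else (cat, none)) = (cat, some (row, (sub.length : Int))) := by simp
          rw [hp]
          dsimp only
          rw [hlen', ih (sub ++ ['m']) cat (some (row, (sub.length : Int))) row hlast' hrow
                (by intro h; simpa using hcat h) (by intro h; cases h)]
          rw [pvFound rest sub 'm' row hsep (hmouse rfl)]
          simp [pvCombine]
          omega
        · rw [if_neg h1, if_neg h2]
          rw [hlen', ih (sub ++ [c]) cat mouse row hlast' hrow
                (by intro h; simp [hcat h]; intro hc'; exact h1 ⟨hc'.symm, h⟩)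
                (by intro h; simp [hmouse h]; intro hm'; exact h2 ⟨hm'.symm, h⟩)]
    · -- separator
      have hcell : pvIsCell c = false := by
        simp only [pvIsCell]; simp only [not_or] at hc
        simp [hc.1, hc.2.1, hc.2.2]
      rw [pvRowsFrom, if_neg hc, pvScanB, if_neg hc]
      have h0 : (0 : Int) = (([] : List Char).length : Int) := by simp
      rw [h0, ih [] cat mouse (row + 1) hlast' (by omega) (by simp) (by simp)]
      cases cat with
      | some q =>
        cases mouse with
        | some q' => simp [pvCombine]
        | none =>
          have hm : pvGetIndexRow sub 'm' 0 = none := pvGetIndexRow_none 'm' sub (hmouse rfl) 0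
          simp [pvCombine, pvGetIndexAux, hm]
      | none =>
        have hC : pvGetIndexRow sub 'C' 0 = none := pvGetIndexRow_none 'C' sub (hcat rfl) 0
        cases mouse with
        | some q' => simp [pvCombine, pvGetIndexAux, hC]
        | none =>
          have hm : pvGetIndexRow sub 'm' 0 = none := pvGetIndexRow_none 'm' sub (hmouse rfl) 0
          simp [pvCombine, pvGetIndexAux, hC, hm]

theorem pvCatLoop_eq (cS cE mS mE moves : Int) :
    pvCatLoop cS cE mS mE moves =
      if (((cS - mS).natAbs : Int) + ((cE - mE).natAbs : Int)) ≤ moves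
      then "Caught!" else "Escaped!" := by
  fun_induction pvCatLoop cS cE mS mE moves
  · rename_i h1 h2
    obtain ⟨rfl, rfl⟩ := h2
    simp
    omega
  · rename_i h1 h2 ih
    simp only [dite_eq_ite] at ih
    rw [ih]
    split_ifs <;> first | rfl | (exfalso; omega)
  · rename_i h1
    rw [if_neg]
    omega

-- ===== VERDICT (by name: the statement is the Claim_ definition above) =====
theorem cat_mouse_spec : Claim_equal_cat_mouse := by
  unfold Claim_equal_cat_mouse
  intro map_ moves _
  unfold Spec_cat_mouse
  have hlast : ∀ x, (map_.toList ++ [' ']).getLast? = some x → pvIsCell x = false := by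
    intro x hx
    rw [List.getLast?_concat] at hx
    cases hx
    rfl
  have harr : pvToArray (map_.toList ++ [' ']) = pvRowsFrom (map_.toList ++ [' ']) [] := by
    rw [pvToArray, pvToArrayAux_eq]; simp
  have hscan := pvScanB_eq (map_.toList ++ [' ']) [] none none 0 hlast (le_refl 0)
      (by simp) (by simp)
  simp only [List.length_nil, Nat.cast_zero] at hscan
  simp only [cat_mouse, cat_mouse_alt, pvGetIndex, harr, hscan]
  by_cases hC : (pvGetIndexAux (pvRowsFrom (map_.toList ++ [' ']) []) 'C' 0).1 = -1
  · simp [pvCombine, hC]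
  · by_cases hM : (pvGetIndexAux (pvRowsFrom (map_.toList ++ [' ']) []) 'm' 0).1 = -1
    · simp [pvCombine, hC, hM]
    · simp [pvCombine, hC, hM, pvCatLoop_eq]
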